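-- pv_equiv track=rewrite | github.com/Francesco502/Quant_AI_Dashboard | core/data_service.py | _merge_data_sources
-- ===== SOURCE A (Python) =====
-- from typing import List, Dict, Optional, Tuple
--
-- DEFAULT_DATA_SOURCE_ORDER = ["Tushare", "AkShare", "AlphaVantage", "Binance", "yfinance"]
--
-- def _merge_data_sources(preferred: List[str]) -> List[str]:
--     merged: List[str] = []
--     for source in preferred:
--         if source in DEFAULT_DATA_SOURCE_ORDER and source not in merged:
--             merged.append(source)
--     for source in DEFAULT_DATA_SOURCE_ORDER:
--         if source not in merged:
--             merged.append(source)
--     return merged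
-- ===== SOURCE B (Python) =====
-- from typing import List
--
-- DEFAULT_DATA_SOURCE_ORDER = ["Tushare", "AkShare", "AlphaVantage", "Binance", "yfinance"]
--
-- def _merge_data_sources(preferred: List[str]) -> List[str]:
--     n = len(preferred)
--     # fallback rank: places a non-preferred default after every preferred one,
--     # keeping the default order among themselves
--     rank = {s: n + i for i, s in enumerate(DEFAULT_DATA_SOURCE_ORDER)}
--     pos = {}
--     for i, s in enumerate(preferred):
--         if s not in pos:
--             pos[s] = i
--     return sorted(DEFAULT_DATA_SOURCE_ORDER, key=lambda s: pos.get(s, rank[s]))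
-- ===== Notes on version B (the rewrite author's own statement) =====
-- stated objective: alternative
-- what changed: Replaces A's two membership-testing append loops by an index-table-plus-sort strategy: one pass records each source's first index in preferred, non-preferred defaults get fallback ranks placing them after all preferred ones, and the result is sorted(DEFAULT_DATA_SOURCE_ORDER, key=rank).
import Mathlib
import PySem

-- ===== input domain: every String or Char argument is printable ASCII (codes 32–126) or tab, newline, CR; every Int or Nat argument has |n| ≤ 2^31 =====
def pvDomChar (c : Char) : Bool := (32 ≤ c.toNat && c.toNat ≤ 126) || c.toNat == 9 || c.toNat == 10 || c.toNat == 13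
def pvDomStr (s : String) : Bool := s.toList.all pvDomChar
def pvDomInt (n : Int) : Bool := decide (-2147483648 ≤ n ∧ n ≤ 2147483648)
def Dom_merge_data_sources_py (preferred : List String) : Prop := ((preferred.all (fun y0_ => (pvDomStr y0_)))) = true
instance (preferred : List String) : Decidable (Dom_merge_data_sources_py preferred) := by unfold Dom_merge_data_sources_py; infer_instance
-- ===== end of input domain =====

-- B replaces A's two membership-testing append loops by an index table plus a stable sort:
-- one pass records each source's first index in `preferred`, non-preferred defaults get
-- fallback ranks after all preferred ones, and the result is sorted(defaults, key=rank).
-- Objective: alternative algorithm. No side effects.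

def pvDefaults : List String := ["Tushare", "AkShare", "AlphaVantage", "Binance", "yfinance"]

-- ===== PORT A =====
def merge_data_sources_py (preferred : List String) : List String :=
  let merged := preferred.foldl
    (fun m source => if source ∈ pvDefaults ∧ source ∉ m then m ++ [source] else m) []
  pvDefaults.foldl (fun m source => if source ∉ m then m ++ [source] else m) merged

-- ===== PORT B =====
-- rank = {s: n + i for i, s in enumerate(DEFAULT_DATA_SOURCE_ORDER)}
def pvRank (n : Int) : PySem.Dict String Int :=
  (PySem.List.enumerate pvDefaults).foldl (fun d p => d.insert p.2 (n + p.1)) PySem.Dict.empty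

-- for i, s in enumerate(preferred): if s not in pos: pos[s] = i
def pvPos (preferred : List String) : PySem.Dict String Int :=
  (PySem.List.enumerate preferred).foldl
    (fun d p => if d.contains p.2 then d else d.insert p.2 p.1) PySem.Dict.empty

-- key = lambda s: pos.get(s, rank[s]); rank[s] never raises (every s sorted is a default
-- key of rank), so getD with junk default 0 is exact here
def pvKey (preferred : List String) (s : String) : Int :=
  (pvPos preferred).getD s ((pvRank (preferred.length : Int)).getD s 0)

def merge_data_sources_py_alt (preferred : List String) : List String :=
  PySem.List.sorted pvDefaults (pvKey preferred) false

-- ===== PRECONDITION & SPEC =====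
def Spec_merge_data_sources_py (preferred : List String) (out : List String) : Prop := out = merge_data_sources_py_alt preferred
instance (preferred : List String) (out : List String) : Decidable (Spec_merge_data_sources_py preferred out) := by unfold Spec_merge_data_sources_py; infer_instance

-- ===== CLAIM (what is proved, stated in full; the proofs are below) =====
def Claim_equal_merge_data_sources_py : Prop := ∀ (preferred : List String), Dom_merge_data_sources_py preferred → Spec_merge_data_sources_py preferred (merge_data_sources_py preferred)

-- ===== LEMMAS AND PROOFS =====

-- ---- characterization of A's output (two loops) ----

-- A's first loop over xs, starting from the filtered accumulator, equals filtering the dedup fold.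
theorem pv_loop1_eq (xs : List String) (acc : List String) :
    xs.foldl (fun m source => if source ∈ pvDefaults ∧ source ∉ m then m ++ [source] else m)
      (acc.filter (fun s => s ∈ pvDefaults))
    = (xs.foldl PySem.Set.add acc).filter (fun s => s ∈ pvDefaults) := by
  induction xs generalizing acc with
  | nil => rfl
  | cons x xs ih =>
    simp only [List.foldl_cons, PySem.Set.add, PySem.Set.contains]
    by_cases hd : x ∈ pvDefaults
    · have hmem : (x ∈ acc.filter (fun s => s ∈ pvDefaults)) ↔ x ∈ acc := by
        simp [List.mem_filter, hd]
      by_cases hacc : x ∈ acc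
      · have hc : acc.contains x = true := by simpa [List.contains_iff_mem] using hacc
        rw [if_neg (by simp [hd, hmem, hacc]), if_pos hc]
        exact ih acc
      · have hc : ¬ acc.contains x = true := by simpa [List.contains_iff_mem] using hacc
        rw [if_pos ⟨hd, by simp [hmem, hacc]⟩, if_neg hc]
        have : (acc.filter (fun s => s ∈ pvDefaults)) ++ [x]
            = (acc ++ [x]).filter (fun s => s ∈ pvDefaults) := by
          simp [List.filter_append, hd]
        rw [this]
        exact ih (acc ++ [x])
    · rw [if_neg (by simp [hd])]
      by_cases hacc : acc.contains x = true
      · rw [if_pos hacc]; exact ih acc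
      · rw [if_neg hacc]
        have : (acc.filter (fun s => s ∈ pvDefaults))
            = (acc ++ [x]).filter (fun s => s ∈ pvDefaults) := by
          simp [List.filter_append, hd]
        rw [this]; exact ih (acc ++ [x])

theorem pv_merged_eq (preferred : List String) :
    preferred.foldl
      (fun m source => if source ∈ pvDefaults ∧ source ∉ m then m ++ [source] else m) []
    = (PySem.List.dedup preferred).filter (fun s => s ∈ pvDefaults) := by
  have := pv_loop1_eq preferred []
  simpa [PySem.List.dedup, PySem.Set.ofList, PySem.Set.empty] using this

-- membership in the filtered dedup, for a default source
theorem pv_mem_merged (preferred : List String) (s : String) (hs : s ∈ pvDefaults) :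
    s ∈ (PySem.List.dedup preferred).filter (fun t => t ∈ pvDefaults) ↔ s ∈ preferred := by
  simp [List.mem_filter, PySem.List.dedup, PySem.Set.mem_ofList, hs]

-- A's second loop, from an accumulator containing exactly the preferred defaults,
-- appends the non-preferred defaults in order.
theorem pv_loop2_eq (preferred M : List String)
    (h1 : ("Tushare" ∈ M) ↔ "Tushare" ∈ preferred)
    (h2 : ("AkShare" ∈ M) ↔ "AkShare" ∈ preferred)
    (h3 : ("AlphaVantage" ∈ M) ↔ "AlphaVantage" ∈ preferred)
    (h4 : ("Binance" ∈ M) ↔ "Binance" ∈ preferred)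
    (h5 : ("yfinance" ∈ M) ↔ "yfinance" ∈ preferred) :
    pvDefaults.foldl (fun m source => if source ∉ m then m ++ [source] else m) M
    = M ++ pvDefaults.filter (fun s => s ∉ preferred) := by
  simp only [pvDefaults, List.foldl_cons, List.foldl_nil, List.filter_cons, List.filter_nil]
  by_cases c1 : "Tushare" ∈ preferred <;>
  by_cases c2 : "AkShare" ∈ preferred <;>
  by_cases c3 : "AlphaVantage" ∈ preferred <;>
  by_cases c4 : "Binance" ∈ preferred <;>
  by_cases c5 : "yfinance" ∈ preferred <;>
    simp [h1, h2, h3, h4, h5, c1, c2, c3, c4, c5, List.mem_append]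

-- A's full output: preferred defaults (first-occurrence order), then missing defaults
theorem pv_A_eq (preferred : List String) :
    merge_data_sources_py preferred
    = (PySem.List.dedup preferred).filter (fun s => s ∈ pvDefaults)
      ++ pvDefaults.filter (fun s => s ∉ preferred) := by
  unfold merge_data_sources_py
  rw [pv_merged_eq]
  exact pv_loop2_eq preferred _
    (pv_mem_merged _ _ (by decide)) (pv_mem_merged _ _ (by decide))
    (pv_mem_merged _ _ (by decide)) (pv_mem_merged _ _ (by decide))
    (pv_mem_merged _ _ (by decide))

-- ---- the pos dict holds the first index of each element of preferred ----

theorem pv_pos_get (xs : List String) (k : Int) (d : PySem.Dict String Int) (s : String) :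
    ((PySem.List.enumerate xs k).foldl
        (fun d p => if d.contains p.2 then d else d.insert p.2 p.1) d).get? s
    = (d.get? s).or (if s ∈ xs then some (k + (xs.idxOf s : Int)) else none) := by
  induction xs generalizing k d with
  | nil => simp [PySem.List.enumerate_nil]
  | cons x xs ih =>
    rw [PySem.List.enumerate_cons, List.foldl_cons]
    by_cases hs : s = x
    · subst hs
      by_cases hc : d.contains s
      · rw [if_pos hc, ih]
        obtain ⟨v, hv⟩ : ∃ v, d.get? s = some v := by
          rcases h : d.get? s with _ | v
          · exact absurd ((PySem.Dict.get?_eq_none_iff_contains d s).mp h) (by simp [hc])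
          · exact ⟨v, rfl⟩
        simp [hv]
      · rw [if_neg hc, ih]
        have hd : d.get? s = none := (PySem.Dict.get?_eq_none_iff_contains d s).mpr (by simpa using hc)
        simp [hd, List.idxOf_cons_self]
    · have step : ∀ d' : PySem.Dict String Int,
          (if d'.contains x then d' else d'.insert x k).get? s = d'.get? s := by
        intro d'
        split
        · rfl
        · exact PySem.Dict.get?_insert_of_ne d' k hs
      rw [ih]
      rw [step d]
      by_cases hm : s ∈ xs
      · have : s ∈ x :: xs := List.mem_cons_of_mem _ hm
        rw [if_pos hm, if_pos this, List.idxOf_cons_ne _ (fun h => hs h.symm)]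
        push_cast
        ring_nf
      · have : s ∉ x :: xs := by simp [hs, hm]
        rw [if_neg hm, if_neg this]

theorem pv_key_of_mem (preferred : List String) (s : String) (hm : s ∈ preferred) :
    pvKey preferred s = (preferred.idxOf s : Int) := by
  unfold pvKey pvPos
  unfold PySem.Dict.getD
  rw [pv_pos_get preferred 0 PySem.Dict.empty s]
  simp [hm]

theorem pv_key_of_not_mem (preferred : List String) (s : String) (hm : s ∉ preferred) :
    pvKey preferred s = (pvRank (preferred.length : Int)).getD s 0 := by
  unfold pvKey pvPos
  unfold PySem.Dict.getD
  rw [pv_pos_get preferred 0 PySem.Dict.empty s]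
  simp [hm]

-- ---- rank values ----

theorem pv_rank_vals (n : Int) :
    (pvRank n).getD "Tushare" 0 = n + 0 ∧ (pvRank n).getD "AkShare" 0 = n + 1 ∧
    (pvRank n).getD "AlphaVantage" 0 = n + 2 ∧ (pvRank n).getD "Binance" 0 = n + 3 ∧
    (pvRank n).getD "yfinance" 0 = n + 4 := by
  unfold pvRank pvDefaults
  simp [PySem.List.enumerate_cons, PySem.List.enumerate_nil, PySem.Dict.getD_insert]

-- ---- dedup keeps first occurrences in order of first index ----

theorem pv_foldl_add_eq (xs : List String) (acc : List String) :
    xs.foldl PySem.Set.add acc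
    = acc ++ (PySem.List.dedup xs).filter (fun a => decide (a ∉ acc)) := by
  induction xs generalizing acc with
  | nil => simp [PySem.List.dedup, PySem.Set.ofList]
  | cons y ys ih =>
    have hded : PySem.List.dedup (y :: ys)
        = [y] ++ (PySem.List.dedup ys).filter (fun a => decide (a ∉ ([y] : List String))) := by
      show List.foldl PySem.Set.add PySem.Set.empty (y :: ys) = _
      rw [List.foldl_cons]
      have : PySem.Set.add PySem.Set.empty y = [y] := rfl
      rw [this, ih [y]]
    rw [List.foldl_cons]
    by_cases hy : y ∈ acc
    · have : PySem.Set.add acc y = acc := by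
        simp [PySem.Set.add, PySem.Set.contains, hy]
      rw [this, ih acc, hded]
      have hpt : ∀ a : String,
          (decide (a ∉ acc) && decide (a ∉ ([y] : List String))) = decide (a ∉ acc) := by
        intro a
        by_cases ha : a = y
        · subst ha; simp [hy]
        · simp [ha]
      simp only [List.filter_append, List.filter_filter]
      rw [List.filter_cons, List.filter_nil]
      rw [if_neg (by simp [hy])]
      simp only [hpt]
      simp
    · have : PySem.Set.add acc y = acc ++ [y] := by
        simp [PySem.Set.add, PySem.Set.contains, hy]
      rw [this, ih (acc ++ [y]), hded]
      have hpt : ∀ a : String,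
          (decide (a ∉ acc) && decide (a ∉ ([y] : List String)))
          = decide (a ∉ acc ++ [y]) := by
        intro a
        by_cases ha : a = y
        · subst ha; simp
        · simp [ha, List.mem_append, Bool.and_comm]
      simp only [List.filter_append, List.filter_filter]
      rw [List.filter_cons, List.filter_nil]
      rw [if_pos (by simp [hy])]
      simp only [hpt]
      simp

theorem pv_dedup_cons (y : String) (ys : List String) :
    PySem.List.dedup (y :: ys)
    = y :: (PySem.List.dedup ys).filter (fun a => decide (a ∉ ([y] : List String))) := by
  show List.foldl PySem.Set.add PySem.Set.empty (y :: ys) = _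
  rw [List.foldl_cons]
  have : PySem.Set.add PySem.Set.empty y = [y] := rfl
  rw [this, pv_foldl_add_eq ys [y]]
  rfl

theorem pv_dedup_pairwise (xs : List String) :
    (PySem.List.dedup xs).Pairwise (fun a b => xs.idxOf a < xs.idxOf b) := by
  induction xs with
  | nil => simp [PySem.List.dedup, PySem.Set.ofList]
  | cons x xs ih =>
    rw [pv_dedup_cons]
    refine List.pairwise_cons.mpr ⟨?_, ?_⟩
    · intro b hb
      have hbne : b ≠ x := by
        have := (List.mem_filter.mp hb).2
        simpa using this
      rw [List.idxOf_cons_self, List.idxOf_cons_ne _ (fun h => hbne h.symm)]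
      omega
    · have hsub := List.filter_sublist (p := fun a => decide (a ∉ ([x] : List String)))
        (l := PySem.List.dedup xs)
      have hpw := List.Pairwise.sublist hsub ih
      refine hpw.imp_of_mem ?_
      intro a b ha hb hab
      have hane : a ≠ x := by have := (List.mem_filter.mp ha).2; simpa using this
      have hbne : b ≠ x := by have := (List.mem_filter.mp hb).2; simpa using this
      rw [List.idxOf_cons_ne _ (fun h => hane h.symm), List.idxOf_cons_ne _ (fun h => hbne h.symm)]
      omega

-- ---- permutation and sortedness of A's output under B's key ----

theorem pv_perm (preferred : List String) :
    ((PySem.List.dedup preferred).filter (fun s => s ∈ pvDefaults)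
      ++ pvDefaults.filter (fun s => s ∉ preferred)).Perm pvDefaults := by
  have hP : ((PySem.List.dedup preferred).filter (fun s => s ∈ pvDefaults)).Perm
      (pvDefaults.filter (fun s => decide (s ∈ preferred))) := by
    rw [List.perm_ext_iff_of_nodup]
    · intro a
      simp [List.mem_filter, PySem.List.dedup, PySem.Set.mem_ofList, and_comm]
    · exact (PySem.Set.nodup_ofList preferred).filter _
    · exact (by decide : pvDefaults.Nodup).filter _
  have hQ : pvDefaults.filter (fun s => s ∉ preferred)
      = pvDefaults.filter (fun s => !(decide (s ∈ preferred))) := by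
    simp [decide_not]
  refine List.Perm.trans ?_ (List.filter_append_perm (fun s => decide (s ∈ preferred)) pvDefaults)
  rw [hQ]
  exact hP.append_right _

theorem pv_pairwise (preferred : List String) :
    ((PySem.List.dedup preferred).filter (fun s => s ∈ pvDefaults)
      ++ pvDefaults.filter (fun s => s ∉ preferred)).Pairwise
      (fun a b => pvKey preferred a < pvKey preferred b) := by
  obtain ⟨r1, r2, r3, r4, r5⟩ := pv_rank_vals (preferred.length : Int)
  have hrk : ∀ b ∈ pvDefaults, b ∉ preferred →
      pvKey preferred b = (pvRank (preferred.length : Int)).getD b 0 ∧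
      (preferred.length : Int) ≤ (pvRank (preferred.length : Int)).getD b 0 := by
    intro b hb hnb
    refine ⟨pv_key_of_not_mem _ _ hnb, ?_⟩
    rcases (by simpa [pvDefaults] using hb : b = "Tushare" ∨ b = "AkShare" ∨
        b = "AlphaVantage" ∨ b = "Binance" ∨ b = "yfinance") with rfl | rfl | rfl | rfl | rfl <;>
      simp only [r1, r2, r3, r4, r5] <;> omega
  rw [List.pairwise_append]
  refine ⟨?_, ?_, ?_⟩
  · -- preferred part: first-occurrence indices strictly increase
    have hsub := List.filter_sublist (p := fun s => decide (s ∈ pvDefaults)) (l := PySem.List.dedup preferred)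
    have hpw := List.Pairwise.sublist hsub (pv_dedup_pairwise preferred)
    refine hpw.imp_of_mem ?_
    intro a b ha hb hab
    have hma : a ∈ preferred := by
      have := (List.mem_filter.mp ha).1
      rwa [PySem.List.dedup, PySem.Set.mem_ofList] at this
    have hmb : b ∈ preferred := by
      have := (List.mem_filter.mp hb).1
      rwa [PySem.List.dedup, PySem.Set.mem_ofList] at this
    rw [pv_key_of_mem _ _ hma, pv_key_of_mem _ _ hmb]
    exact_mod_cast hab
  · -- absent part: fallback ranks strictly increase in default order
    have hD : pvDefaults.Pairwise (fun a b =>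
        (pvRank (preferred.length : Int)).getD a 0 < (pvRank (preferred.length : Int)).getD b 0) := by
      simp only [pvDefaults, List.pairwise_cons, List.mem_cons, List.not_mem_nil,
        List.Pairwise.nil, or_false]
      refine ⟨?_, ?_, ?_, ?_, by simp⟩ <;>
        · intro b hb
          rcases hb with rfl | rfl | rfl | rfl | rfl <;>
            simp only [r1, r2, r3, r4, r5] <;> omega
    have hpw := List.Pairwise.sublist (List.filter_sublist (p := fun s => decide (s ∉ preferred)) (l := pvDefaults)) hD
    refine hpw.imp_of_mem ?_
    intro a b ha hb hab
    have hpa := List.mem_filter.mp ha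
    have hpb := List.mem_filter.mp hb
    rw [(hrk a hpa.1 (by simpa using hpa.2)).1, (hrk b hpb.1 (by simpa using hpb.2)).1]
    exact hab
  · -- cross: every first index is below every fallback rank
    intro a ha b hb
    have hma : a ∈ preferred := by
      have := (List.mem_filter.mp ha).1
      rwa [PySem.List.dedup, PySem.Set.mem_ofList] at this
    have hpb := List.mem_filter.mp hb
    obtain ⟨hkb, hnb⟩ := hrk b hpb.1 (by simpa using hpb.2)
    rw [pv_key_of_mem _ _ hma, hkb]
    have : preferred.idxOf a < preferred.length := List.idxOf_lt_length_of_mem hma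
    omega

theorem pv_main (preferred : List String) :
    merge_data_sources_py preferred = merge_data_sources_py_alt preferred := by
  rw [pv_A_eq]
  unfold merge_data_sources_py_alt
  exact (PySem.List.sorted_eq_of_perm_of_pairwise_lt _ _ _ (pv_perm preferred)
    (pv_pairwise preferred)).symm

-- ===== VERDICT (by name: the statement is the Claim_ definition above) =====
theorem merge_data_sources_py_spec : Claim_equal_merge_data_sources_py := by
  intro preferred _
  exact pv_main preferred
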